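-- pv_equiv track=rewrite | github.com/LivingPark-MRI/livingpark-utils | livingpark_utils/maketal/maketal.py | find_visit_pairs
-- ===== SOURCE A (Python) =====
-- from collections import defaultdict
-- from itertools import combinations
--
-- visit2month = {
--     "BL": 0,
--     "V01": 3,
--     "V02": 6,
--     "V03": 9,
--     "V04": 12,
--     "V05": 18,
--     "V06": 24,
--     "V07": 30,
--     "V08": 36,
--     "V09": 42,
--     "V10": 48,
--     "V11": 54,
--     "V12": 60,
--     "V13": 72,
--     "V14": 84,
--     "V15": 96,
--     "V16": 108,
--     "V17": 120,
--     "V18": 132,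
--     "V19": 144,
--     "V20": 156,
-- }
--
-- def find_visit_pairs(months: int) -> dict:
--     """Return the pairs of visits closest to each other.
--
--     Visit pairs are found given a target time difference in months.
--
--     Parameters
--     ----------
--     months: int
--         number of months between baseline and
--         follow-up
--
--     Returns
--     -------
--     dict
--         pairs of visits (EVENT_ID in PPMI dataset)
--         closest to each other, given the number of
--         months between baseline and follow-up
--     """
--     diff = float("inf")
--     diff_hist: dict = defaultdict(dict)
--
--     for (k, v), (k_, v_) in combinations(visit2month.items(), 2):
--         if (diff_ := abs(abs(v - v_) - months)) <= diff:
--             diff = diff_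
--             diff_hist[diff][k] = k_
--
--     return diff_hist[diff]
-- ===== SOURCE B (Python) =====
-- visit2month = {
--     "BL": 0,
--     "V01": 3,
--     "V02": 6,
--     "V03": 9,
--     "V04": 12,
--     "V05": 18,
--     "V06": 24,
--     "V07": 30,
--     "V08": 36,
--     "V09": 42,
--     "V10": 48,
--     "V11": 54,
--     "V12": 60,
--     "V13": 72,
--     "V14": 84,
--     "V15": 96,
--     "V16": 108,
--     "V17": 120,
--     "V18": 132,
--     "V19": 144,
--     "V20": 156,
-- }
--
--
-- def _annotate(items, months):
--     """Recursively build (k, k_, abs(abs(v - v_) - months)) for every pair of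
--     distinct visits, the first one preceding the second in visit2month order."""
--     if not items:
--         return []
--     (k, v), rest = items[0], items[1:]
--     return [(k, k_, abs(abs(v - v_) - months)) for (k_, v_) in rest] + _annotate(rest, months)
--
--
-- def find_visit_pairs(months: int) -> dict:
--     """Materialize the annotated pair list once, take the minimal annotation,
--     then keep exactly the pairs attaining it."""
--     pairs = _annotate(list(visit2month.items()), months)
--     best = min(d for _, _, d in pairs)
--     return {k: k_ for k, k_, d in pairs if d == best}
-- ===== Notes on version B (the rewrite author's own statement) =====
-- stated objective: alternative
-- what changed: Replaces A's single pass over combinations keeping a running minimum and an in-place defaultdict histogram of dicts by a staged pipeline: recursively materialize an annotated (k, k_, |gap - months|) pair list, take its minimum once, then filter the list into a plain dict.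
import Mathlib
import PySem

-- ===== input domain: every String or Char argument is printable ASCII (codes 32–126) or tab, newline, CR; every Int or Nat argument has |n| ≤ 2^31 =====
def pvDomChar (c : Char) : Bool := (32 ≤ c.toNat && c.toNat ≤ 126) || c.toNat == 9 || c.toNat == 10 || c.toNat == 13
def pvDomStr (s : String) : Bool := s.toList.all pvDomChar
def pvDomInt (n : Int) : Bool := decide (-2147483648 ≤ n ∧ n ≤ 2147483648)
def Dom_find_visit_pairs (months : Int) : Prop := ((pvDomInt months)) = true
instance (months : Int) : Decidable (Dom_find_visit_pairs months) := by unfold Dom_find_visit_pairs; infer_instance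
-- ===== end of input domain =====

-- B replaces A's single pass with a running minimum and an in-place histogram of dicts
-- by a staged pipeline: materialize the annotated pair list, take its minimum, filter
-- it into a dict (objective: alternative decomposition, same cost).

-- shared module constant: visit2month.items()
def visitItems : List (String × Int) :=
  [("BL", 0), ("V01", 3), ("V02", 6), ("V03", 9), ("V04", 12), ("V05", 18), ("V06", 24),
   ("V07", 30), ("V08", 36), ("V09", 42), ("V10", 48), ("V11", 54), ("V12", 60), ("V13", 72),
   ("V14", 84), ("V15", 96), ("V16", 108), ("V17", 120), ("V18", 132), ("V19", 144), ("V20", 156)]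

-- ===== PORT A =====
-- itertools.combinations(xs, 2), in Python's order
def combos2 {α : Type} : List α → List (α × α)
  | [] => []
  | x :: xs => xs.map (fun y => (x, y)) ++ combos2 xs

-- abs(abs(v - v_) - months) for a pair ((k, v), (k_, v_))
def pdiff (months : Int) (p : (String × Int) × (String × Int)) : Int :=
  |(|p.1.2 - p.2.2| : Int) - months|

-- loop body: if (diff_ := abs(abs(v - v_) - months)) <= diff: diff = diff_; diff_hist[diff][k] = k_
-- diff = float("inf") is the `none` state of the Option
def aStep (months : Int) (st : Option Int × PySem.Dict Int (PySem.Dict String String))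
    (p : (String × Int) × (String × Int)) :
    Option Int × PySem.Dict Int (PySem.Dict String String) :=
  let d_ := pdiff months p
  let ok : Bool := match st.1 with
    | none => true
    | some d => decide (d_ ≤ d)
  if ok then (some d_, st.2.insert d_ ((st.2.getD d_ PySem.Dict.empty).insert p.1.1 p.2.1))
  else st

-- return diff_hist[diff] (a defaultdict: a missing key yields {}); diff = inf is `none`
def find_visit_pairs (months : Int) : List (String × String) :=
  match (combos2 visitItems).foldl (aStep months) (none, PySem.Dict.empty) with
  | (none, _) => []
  | (some d, hist) => (hist.getD d PySem.Dict.empty).items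

-- ===== PORT B =====
-- _annotate(items, months): recursion on the item list, one comprehension per head
def annotate (months : Int) : List (String × Int) → List (String × String × Int)
  | [] => []
  | (k, v) :: rest =>
      rest.map (fun q => (k, q.1, |(|v - q.2| : Int) - months|)) ++ annotate months rest

-- best = min(d for _, _, d in pairs); {k: k_ for k, k_, d in pairs if d == best}
def find_visit_pairs_alt (months : Int) : List (String × String) :=
  let pairs := annotate months visitItems
  match PySem.List.min? (pairs.map (fun t => t.2.2)) (fun x => x) with
  | none => []
  | some best =>
      (pairs.foldl (fun acc t => if t.2.2 = best then acc.insert t.1 t.2.1 else acc)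
        PySem.Dict.empty).items

-- ===== PRECONDITION & SPEC =====
def Spec_find_visit_pairs (months : Int) (out : List (String × String)) : Prop := out = find_visit_pairs_alt months
instance (months : Int) (out : List (String × String)) : Decidable (Spec_find_visit_pairs months out) := by unfold Spec_find_visit_pairs; infer_instance

-- ===== CLAIM (what is proved, stated in full; the proofs are below) =====
def Claim_equal_find_visit_pairs : Prop := ∀ (months : Int), Dom_find_visit_pairs months → Spec_find_visit_pairs months (find_visit_pairs months)

-- ===== LEMMAS AND PROOFS =====

-- B's annotated pair list is exactly the combination list with (first key, second key, diff)
lemma annotate_eq (months : Int) (xs : List (String × Int)) :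
    annotate months xs = (combos2 xs).map (fun p => (p.1.1, p.2.1, pdiff months p)) := by
  induction xs with
  | nil => rfl
  | cons x xs ih =>
    obtain ⟨k, v⟩ := x
    simp [annotate, combos2, ih, pdiff]

-- A's running minimum: starting from a `some d` state, the first component stays `some`,
-- only decreases, bounds every element seen, and is either the start or some element.
lemma fold_fst_some (months : Int) :
    ∀ (ps : List ((String × Int) × (String × Int)))
      (st : Option Int × PySem.Dict Int (PySem.Dict String String)) (d : Int),
      st.1 = some d →
      ∃ e, ((ps.foldl (aStep months) st).1 = some e ∧ e ≤ d ∧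
        (∀ p ∈ ps, e ≤ pdiff months p) ∧ (e = d ∨ ∃ p ∈ ps, e = pdiff months p)) := by
  intro ps
  induction ps with
  | nil =>
    intro st d h
    exact ⟨d, by simpa using h, le_refl d, by simp, Or.inl rfl⟩
  | cons p ps ih =>
    intro st d h
    by_cases hle : pdiff months p ≤ d
    · have hstep : (aStep months st p).1 = some (pdiff months p) := by
        simp [aStep, h, hle]
      obtain ⟨e, he, hed, hall, hor⟩ := ih (aStep months st p) (pdiff months p) hstep
      refine ⟨e, by simpa using he, le_trans hed hle, ?_, ?_⟩
      · intro q hq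
        rcases List.mem_cons.mp hq with rfl | hq
        · exact hed
        · exact hall q hq
      · rcases hor with rfl | ⟨q, hq, rfl⟩
        · exact Or.inr ⟨p, List.mem_cons_self .., rfl⟩
        · exact Or.inr ⟨q, List.mem_cons_of_mem _ hq, rfl⟩
    · have hstep : aStep months st p = st := by
        simp [aStep, h, hle]
      obtain ⟨e, he, hed, hall, hor⟩ := ih st d h
      refine ⟨e, by simpa [hstep] using he, hed, ?_, ?_⟩
      · intro q hq
        rcases List.mem_cons.mp hq with rfl | hq
        · exact le_trans hed (le_of_lt (lt_of_not_ge hle))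
        · exact hall q hq
      · rcases hor with rfl | ⟨q, hq, rfl⟩
        · exact Or.inl rfl
        · exact Or.inr ⟨q, List.mem_cons_of_mem _ hq, rfl⟩

-- the histogram at the global minimum m: every pair with pdiff = m is recorded (the running
-- min never dips below m), and nothing else lands in bucket m.
lemma fold_hist (months m : Int) :
    ∀ (ps : List ((String × Int) × (String × Int)))
      (st : Option Int × PySem.Dict Int (PySem.Dict String String)),
      (∀ p ∈ ps, m ≤ pdiff months p) →
      (∀ d, st.1 = some d → m ≤ d) →
      ((ps.foldl (aStep months) st).2).getD m PySem.Dict.empty =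
        ps.foldl
          (fun acc p => if pdiff months p = m then acc.insert p.1.1 p.2.1 else acc)
          (st.2.getD m PySem.Dict.empty) := by
  intro ps
  induction ps with
  | nil => intro st _ _; rfl
  | cons p ps ih =>
    intro st hall hinv
    have hmp : m ≤ pdiff months p := hall p (List.mem_cons_self ..)
    have hall' : ∀ q ∈ ps, m ≤ pdiff months q := fun q hq => hall q (List.mem_cons_of_mem _ hq)
    rcases hst : st.1 with _ | d
    · -- running diff is still infinity: the branch fires
      have hstep : aStep months st p =
          (some (pdiff months p),
           st.2.insert (pdiff months p)
             ((st.2.getD (pdiff months p) PySem.Dict.empty).insert p.1.1 p.2.1)) := by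
        simp [aStep, hst]
      rw [List.foldl_cons, List.foldl_cons, hstep,
        ih _ hall' (by intro d' hd'; simp at hd'; omega)]
      by_cases hdm : pdiff months p = m
      · simp [hdm]
      · simp [hdm, PySem.Dict.getD_insert, Ne.symm hdm]
    · by_cases hle : pdiff months p ≤ d
      · have hstep : aStep months st p =
            (some (pdiff months p),
             st.2.insert (pdiff months p)
               ((st.2.getD (pdiff months p) PySem.Dict.empty).insert p.1.1 p.2.1)) := by
          simp [aStep, hst, hle]
        rw [List.foldl_cons, List.foldl_cons, hstep,
          ih _ hall' (by intro d' hd'; simp at hd'; omega)]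
        by_cases hdm : pdiff months p = m
        · simp [hdm]
        · simp [hdm, PySem.Dict.getD_insert, Ne.symm hdm]
      · -- skipped pair: its diff exceeds the running min, hence is not m
        have hstep : aStep months st p = st := by
          simp [aStep, hst, hle]
        have hd : m ≤ d := hinv d hst
        have hdm : ¬ (pdiff months p = m) := by omega
        rw [List.foldl_cons, List.foldl_cons, hstep, ih st hall' hinv, if_neg hdm]

-- ===== VERDICT (by name: the statement is the Claim_ definition above) =====
set_option maxRecDepth 8192 in
theorem find_visit_pairs_spec : Claim_equal_find_visit_pairs := by
  intro months _
  unfold Spec_find_visit_pairs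
  -- rewrite B's staged pipeline onto the combination list
  unfold find_visit_pairs_alt
  simp only [annotate_eq, List.map_map, List.foldl_map, Function.comp_def]
  -- B's first pass: the minimum exists and bounds every pair
  obtain ⟨best, hbest⟩ : ∃ b,
      PySem.List.min? ((combos2 visitItems).map (fun p => pdiff months p)) (fun x => x) = some b := by
    cases hmin : PySem.List.min? ((combos2 visitItems).map (fun p => pdiff months p)) (fun x => x) with
    | none =>
      have := (PySem.List.min?_eq_none_iff _ _).mp hmin
      rw [List.map_eq_nil_iff] at this
      simp [combos2, visitItems] at this
    | some b => exact ⟨b, rfl⟩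
  have hmin_le : ∀ p ∈ combos2 visitItems, best ≤ pdiff months p := by
    intro p hp
    simpa using PySem.List.min?_isMin hbest _ (List.mem_map_of_mem hp)
  have hmem : ∃ p ∈ combos2 visitItems, best = pdiff months p := by
    rcases List.mem_map.mp (PySem.List.min?_mem hbest) with ⟨p, hp, hpe⟩
    exact ⟨p, hp, hpe.symm⟩
  rcases hps : combos2 visitItems with _ | ⟨p0, rest⟩
  · simp [combos2, visitItems] at hps
  rw [hps] at hbest hmin_le hmem
  unfold find_visit_pairs
  rw [hps, hbest]
  have h1 : aStep months (none, PySem.Dict.empty) p0 =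
      (some (pdiff months p0),
       PySem.Dict.empty.insert (pdiff months p0)
         ((PySem.Dict.empty.getD (pdiff months p0) PySem.Dict.empty).insert p0.1.1 p0.2.1)) := by
    simp [aStep]
  obtain ⟨e, he, hed, hall, hor⟩ :=
    fold_fst_some months rest (aStep months (none, PySem.Dict.empty) p0) (pdiff months p0)
      (by rw [h1])
  have hp0 : best ≤ pdiff months p0 := hmin_le p0 (List.mem_cons_self ..)
  have hbe : best ≤ e := by
    rcases hor with rfl | ⟨q, hq, rfl⟩
    · exact hp0
    · exact hmin_le q (List.mem_cons_of_mem _ hq)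
  have heb : e ≤ best := by
    rcases hmem with ⟨q, hq, rfl⟩
    rcases List.mem_cons.mp hq with rfl | hq
    · exact hed
    · exact hall q hq
  have hebst : e = best := le_antisymm heb hbe
  rw [List.foldl_cons,
    ← Prod.mk.eta (p := List.foldl (aStep months) (aStep months (none, PySem.Dict.empty) p0) rest),
    he, hebst]
  show ((List.foldl (aStep months) (aStep months (none, PySem.Dict.empty) p0) rest).2.getD
      best PySem.Dict.empty).items = _
  have hhist := fold_hist months best rest (aStep months (none, PySem.Dict.empty) p0)
    (fun q hq => hmin_le q (List.mem_cons_of_mem _ hq))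
    (by rw [h1]; intro d' hd'; simp at hd'; omega)
  rw [hhist, h1]
  simp only [List.foldl_cons]
  by_cases hdm : pdiff months p0 = best
  · simp [hdm]
  · simp [hdm, PySem.Dict.getD_insert, Ne.symm hdm]
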